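-- pv_equiv track=rewrite | github.com/pypi-data/pypi-mirror-403 | packages/lino/lino-26.2.2-py3-none-any.whl/lino/modlib/help/utils.py | simplify_name
-- ===== SOURCE A (Python) =====
-- simplify_parts = set(["models", "desktop", "ui", "choicelists", "actions", "mixins"])
--
-- def simplify_name(name):
--     """
--     Simplify the given full Python name.
--
--     Removes any part 'models', 'desktop', 'ui', 'choicelists',
--     'mixins' or 'actions' from the name.
--
--     This is used when we want to ignore where exactly a model or table
--     or action is being defined within its plugin.
--     """
--     if name.startswith("lino.mixins."):
--         return name
--     parts = name.split(".")
--     for e in simplify_parts: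
--         if e in parts:
--             parts.remove(e)
--     return ".".join(parts)
-- ===== SOURCE B (Python) =====
-- simplify_parts = set(["models", "desktop", "ui", "choicelists", "actions", "mixins"])
--
-- def simplify_name(name):
--     if name.startswith("lino.mixins."):
--         return name
--     remaining = set(simplify_parts)
--     kept = []
--     for part in name.split("."):
--         if part in remaining:
--             remaining.remove(part)
--         else:
--             kept.append(part)
--     return ".".join(kept)
-- ===== Notes on version B (the rewrite author's own statement) =====
-- stated objective: alternative
-- what changed: Replaces the loop over the six removable words (each doing a membership scan plus a list.remove scan over parts) with a single left-to-right pass over the parts that keeps each token unless it is in a shrinking set of still-removable words, so each removable word is dropped at most once.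
import Mathlib
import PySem

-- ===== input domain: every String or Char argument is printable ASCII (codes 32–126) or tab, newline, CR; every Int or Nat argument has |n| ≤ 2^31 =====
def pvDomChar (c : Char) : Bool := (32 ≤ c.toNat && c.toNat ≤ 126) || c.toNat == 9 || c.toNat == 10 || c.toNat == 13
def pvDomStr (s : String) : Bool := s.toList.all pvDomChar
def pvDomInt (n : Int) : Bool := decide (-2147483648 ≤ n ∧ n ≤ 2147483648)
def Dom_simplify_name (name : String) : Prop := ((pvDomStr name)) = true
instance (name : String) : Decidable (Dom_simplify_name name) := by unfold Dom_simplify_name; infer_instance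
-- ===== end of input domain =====

-- B replaces A's six remove-scans (one per removable word) by one left-to-right pass over the
-- parts with a shrinking set of still-removable words — an alternative decomposition, same result.

-- the module-level set literal, in source order (A's loop result does not depend on the set's
-- iteration order: each distinct word is removed at most once, and such removals commute)
def simplifyParts : List String := ["models", "desktop", "ui", "choicelists", "actions", "mixins"]

-- ===== PORT A =====
def simplify_name (name : String) : String :=
  if PySem.Str.startswith name "lino.mixins." then name
  else
    -- name.split("."): sep ≠ "" so split? is always `some`
    let parts := (PySem.Str.split? name ".").getD []
    let parts := simplifyParts.foldl
      (fun ps e => if e ∈ ps then (PySem.List.remove? ps e).getD ps else ps) parts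
    PySem.Str.join "." parts

-- ===== PORT B =====
-- one pass over the parts; `remaining` is the set of words still to be dropped
def simplifyDrop : List String → List String → List String
  | _, [] => []
  | remaining, p :: ps =>
    if p ∈ remaining then simplifyDrop (remaining.erase p) ps
    else p :: simplifyDrop remaining ps

def simplify_name_alt (name : String) : String :=
  if PySem.Str.startswith name "lino.mixins." then name
  else
    PySem.Str.join "."
      (simplifyDrop (PySem.Set.ofList simplifyParts) ((PySem.Str.split? name ".").getD []))

-- ===== PRECONDITION & SPEC =====
def Spec_simplify_name (name : String) (out : String) : Prop := out = simplify_name_alt name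
instance (name : String) (out : String) : Decidable (Spec_simplify_name name out) := by unfold Spec_simplify_name; infer_instance

-- ===== CLAIM (what is proved, stated in full; the proofs are below) =====
def Claim_equal_simplify_name : Prop := ∀ (name : String), Dom_simplify_name name → Spec_simplify_name name (simplify_name name)

-- ===== LEMMAS AND PROOFS =====

-- the erase-if-member step, A's loop body with list.remove unfolded
def eraseStep (ps : List String) (e : String) : List String := if e ∈ ps then ps.erase e else ps

lemma stepA_eq_eraseStep :
    (fun (ps : List String) (e : String) =>
        if e ∈ ps then (PySem.List.remove? ps e).getD ps else ps) = eraseStep := by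
  funext ps e
  unfold eraseStep
  split
  · next h => rw [PySem.List.remove?_eq_some_erase ps e h]; rfl
  · rfl

lemma foldl_eraseStep_nil (ws : List String) : ws.foldl eraseStep [] = [] := by
  induction ws with
  | nil => rfl
  | cons w ws ih => simpa [eraseStep] using ih

-- head unfolding of A's loop: how the fold over the word list treats p :: parts
lemma foldl_eraseStep_cons (ws : List String) (p : String) (parts : List String) :
    ws.foldl eraseStep (p :: parts)
      = if p ∈ ws then (ws.erase p).foldl eraseStep parts
        else p :: ws.foldl eraseStep parts := by
  induction ws generalizing parts with
  | nil => simp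
  | cons w ws ih =>
    rw [List.foldl_cons]
    by_cases hwp : w = p
    · subst hwp
      have h1 : eraseStep (w :: parts) w = parts := by simp [eraseStep]
      rw [h1, if_pos List.mem_cons_self, List.erase_cons_head]
    · have herase : (w :: ws).erase p = w :: ws.erase p :=
        List.erase_cons_tail (by simp [hwp])
      have hnotc : ∀ (hp : p ∉ ws), p ∉ w :: ws := by
        intro hp h
        rcases List.mem_cons.mp h with h | h
        · exact hwp h.symm
        · exact hp h
      by_cases hw : w ∈ parts
      · have h1 : eraseStep (p :: parts) w = p :: parts.erase w := by
          have : (p :: parts).erase w = p :: parts.erase w :=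
            List.erase_cons_tail (by simp only [beq_iff_eq]; exact fun h => hwp h.symm)
          simp [eraseStep, List.mem_cons, hw, this]
        have h2 : eraseStep parts w = parts.erase w := by simp [eraseStep, hw]
        rw [h1, ih]
        by_cases hp : p ∈ ws
        · rw [if_pos hp, if_pos (List.mem_cons_of_mem _ hp), herase, List.foldl_cons, h2]
        · rw [if_neg hp, if_neg (hnotc hp), List.foldl_cons, h2]
      · have h1 : eraseStep (p :: parts) w = p :: parts := by
          simp [eraseStep, List.mem_cons, hw, hwp]
        have h2 : eraseStep parts w = parts := by simp [eraseStep, hw]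
        rw [h1, ih]
        by_cases hp : p ∈ ws
        · rw [if_pos hp, if_pos (List.mem_cons_of_mem _ hp), herase, List.foldl_cons, h2]
        · rw [if_neg hp, if_neg (hnotc hp), List.foldl_cons, h2]

-- the core equivalence: A's loop of first-occurrence removals = B's single pass, for ANY word list
lemma foldl_eraseStep_eq_simplifyDrop (ws parts : List String) :
    ws.foldl eraseStep parts = simplifyDrop ws parts := by
  induction parts generalizing ws with
  | nil => simp [simplifyDrop, foldl_eraseStep_nil]
  | cons p ps ih =>
    rw [foldl_eraseStep_cons]
    by_cases hp : p ∈ ws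
    · simp [simplifyDrop, hp, ih]
    · simp [simplifyDrop, hp, ih]

-- ===== VERDICT (by name: the statement is the Claim_ definition above) =====
theorem simplify_name_spec : Claim_equal_simplify_name := by
  intro name _
  unfold Spec_simplify_name simplify_name simplify_name_alt
  split
  · rfl
  · have hws : PySem.Set.ofList simplifyParts = simplifyParts := by decide
    rw [hws, stepA_eq_eraseStep]
    show PySem.Str.join "." (simplifyParts.foldl eraseStep ((PySem.Str.split? name ".").getD []))
        = PySem.Str.join "." (simplifyDrop simplifyParts ((PySem.Str.split? name ".").getD []))
    rw [foldl_eraseStep_eq_simplifyDrop]
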